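-- pv_equiv track=rewrite | github.com/robmayes69/athanor | commands/library.py | penn_substitutions
-- ===== SOURCE A (Python) =====
-- def penn_substitutions(input=None):
--     if not input:
--         return ''
--     for bad_char in ['%r', '%R']:
--         input = input.replace(bad_char, '|/')
--     for bad_char in ['%t', '%T']:
--         input = input.replace(bad_char, '|-')
--     return input
-- ===== SOURCE B (Python) =====
-- def penn_substitutions(input=None):
--     if not input:
--         return ''
--     out = []
--     i = 0
--     n = len(input)
--     while i < n:
--         if input[i] == '%' and i + 1 < n:
--             c = input[i + 1]
--             if c == 'r' or c == 'R':
--                 out.append('|/')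
--                 i += 2
--                 continue
--             if c == 't' or c == 'T':
--                 out.append('|-')
--                 i += 2
--                 continue
--         out.append(input[i])
--         i += 1
--     return ''.join(out)
-- ===== Notes on version B (the rewrite author's own statement) =====
-- stated objective: alternative
-- what changed: Four sequential str.replace passes over the string are replaced by one explicit left-to-right index scan that dispatches on each two-character substitution code as it is encountered.
import Mathlib
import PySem

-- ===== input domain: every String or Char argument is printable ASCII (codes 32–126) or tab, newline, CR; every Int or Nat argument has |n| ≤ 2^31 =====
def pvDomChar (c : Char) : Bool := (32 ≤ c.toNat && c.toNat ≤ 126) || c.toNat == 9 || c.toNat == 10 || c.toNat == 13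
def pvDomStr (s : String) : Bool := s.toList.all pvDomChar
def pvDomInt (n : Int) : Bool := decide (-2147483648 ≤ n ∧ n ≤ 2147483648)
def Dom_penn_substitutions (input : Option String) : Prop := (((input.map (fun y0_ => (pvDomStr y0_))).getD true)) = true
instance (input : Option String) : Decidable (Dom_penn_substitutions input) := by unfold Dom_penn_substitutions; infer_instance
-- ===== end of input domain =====

-- B replaces A's four sequential str.replace passes by one left-to-right scan over the characters; same return value (objective: alternative).

-- ===== PORT A =====
def penn_substitutions (input : Option String) : String :=
  match input with
  | none => ""
  | some s =>
    if s = "" then ""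
    else
      let s1 := ["%r", "%R"].foldl (fun acc bad => PySem.Str.replace acc bad "|/") s
      let s2 := ["%t", "%T"].foldl (fun acc bad => PySem.Str.replace acc bad "|-") s1
      s2

-- ===== PORT B =====
-- single left-to-right scan over the characters (Source B's while-loop with index i)
def pennScan : List Char → List Char
  | [] => []
  | [c] => [c]
  | c1 :: c2 :: t =>
    if c1 = '%' ∧ (c2 = 'r' ∨ c2 = 'R') then '|' :: '/' :: pennScan t
    else if c1 = '%' ∧ (c2 = 't' ∨ c2 = 'T') then '|' :: '-' :: pennScan t
    else c1 :: pennScan (c2 :: t)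

def penn_substitutions_alt (input : Option String) : String :=
  match input with
  | none => ""
  | some s =>
    if s = "" then ""
    else String.ofList (pennScan s.toList)

-- ===== PRECONDITION & SPEC =====
def Spec_penn_substitutions (input : Option String) (out : String) : Prop := out = penn_substitutions_alt input
instance (input : Option String) (out : String) : Decidable (Spec_penn_substitutions input out) := by unfold Spec_penn_substitutions; infer_instance

-- ===== CLAIM (what is proved, stated in full; the proofs are below) =====
def Claim_equal_penn_substitutions : Prop := ∀ (input : Option String), Dom_penn_substitutions input → Spec_penn_substitutions input (penn_substitutions input)

-- ===== LEMMAS AND PROOFS =====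

-- replace with pattern ['%', x], as a direct structural recursion
def rep1 (x : Char) (new : List Char) : List Char → List Char
  | [] => []
  | [c] => [c]
  | c1 :: c2 :: t =>
    if c1 = '%' ∧ c2 = x then new ++ rep1 x new t else c1 :: rep1 x new (c2 :: t)

theorem rep1_go (x : Char) (new : List Char) :
    ∀ (fuel : Nat) (l acc : List Char), l.length ≤ fuel →
      PySem.Chars.replace.go ['%', x] new fuel l acc = acc.reverse ++ rep1 x new l := by
  intro fuel
  induction fuel with
  | zero =>
    intro l acc h
    have : l = [] := by cases l <;> simp_all
    subst this
    simp [PySem.Chars.replace.go, rep1]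
  | succ n ih =>
    intro l acc h
    match l with
    | [] => simp [PySem.Chars.replace.go, rep1]
    | [c] =>
      have hpre : (['%', x].isPrefixOf [c]) = false := by
        simp [List.isPrefixOf]
      simp only [PySem.Chars.replace.go, hpre, Bool.false_eq_true, if_false]
      rw [ih [] (c :: acc) (by simp)]
      simp [rep1]
    | c1 :: c2 :: t =>
      by_cases hc : c1 = '%' ∧ c2 = x
      · have hpre : (['%', x].isPrefixOf (c1 :: c2 :: t)) = true := by
          simp [List.isPrefixOf, hc.1, hc.2]
        simp only [PySem.Chars.replace.go, hpre, if_true]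
        rw [ih (List.drop (['%', x] : List Char).length (c1 :: c2 :: t)) (new.reverse ++ acc)
          (by simp at h ⊢; omega)]
        simp [rep1, hc.1, hc.2]
      · have hpre : (['%', x].isPrefixOf (c1 :: c2 :: t)) = false := by
          simp only [List.isPrefixOf, Bool.and_eq_false_iff, beq_eq_false_iff_ne, ne_eq]
          rcases Decidable.not_and_iff_not_or_not.mp hc with h1 | h2
          · exact Or.inl fun he => h1 he.symm
          · exact Or.inr (Or.inl fun he => h2 he.symm)
        simp only [PySem.Chars.replace.go, hpre, Bool.false_eq_true, if_false]
        rw [ih (c2 :: t) (c1 :: acc) (by simp at h ⊢; omega)]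
        simp [rep1, hc]

theorem replace_eq_rep1 (x : Char) (new cs : List Char) :
    PySem.Chars.replace cs ['%', x] new = rep1 x new cs := by
  simp only [PySem.Chars.replace, List.isEmpty_cons, Bool.false_eq_true, if_false]
  exact rep1_go x new cs.length cs [] (le_refl _)

theorem rep1_cons_ne (x : Char) (new : List Char) (c : Char) (z : List Char) (h : c ≠ '%') :
    rep1 x new (c :: z) = c :: rep1 x new z := by
  cases z with
  | nil => simp [rep1]
  | cons c2 t => simp [rep1, h]

theorem rep1_hit (x : Char) (new : List Char) (c2 : Char) (t : List Char) (h : c2 = x) :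
    rep1 x new ('%' :: c2 :: t) = new ++ rep1 x new t := by
  simp [rep1, h]

theorem rep1_pct (x : Char) (new z : List Char) (h : z.head? ≠ some x) :
    rep1 x new ('%' :: z) = '%' :: rep1 x new z := by
  cases z with
  | nil => simp [rep1]
  | cons c2 t =>
    have : c2 ≠ x := by simpa using h
    simp [rep1, this]

theorem head_rep1 (x : Char) (n z : List Char) :
    (rep1 x ('|' :: n) z).head? = z.head? ∨ (rep1 x ('|' :: n) z).head? = some '|' := by
  match z with
  | [] => simp [rep1]
  | [c] => simp [rep1]
  | c1 :: c2 :: t =>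
    by_cases hc : c1 = '%' ∧ c2 = x
    · simp [rep1, hc]
    · simp [rep1, hc]

-- the composition of the four single-pattern passes
def fourRep (cs : List Char) : List Char :=
  rep1 'T' ['|', '-'] (rep1 't' ['|', '-'] (rep1 'R' ['|', '/'] (rep1 'r' ['|', '/'] cs)))

theorem pennScan_cons_ne (c : Char) (z : List Char) (h : c ≠ '%') :
    pennScan (c :: z) = c :: pennScan z := by
  cases z with
  | nil => simp [pennScan]
  | cons c2 t => simp [pennScan, h]

theorem head_fourRep_pct (t0 : List Char) :
    (rep1 'R' ['|', '/'] (rep1 'r' ['|', '/'] ('%' :: t0))).head? = some '%' ∨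
    (rep1 'R' ['|', '/'] (rep1 'r' ['|', '/'] ('%' :: t0))).head? = some '|' := by
  rcases head_rep1 'r' ['/'] ('%' :: t0) with h1 | h1 <;>
    rcases head_rep1 'R' ['/'] (rep1 'r' ['|', '/'] ('%' :: t0)) with h2 | h2 <;>
    simp_all

theorem fourRep_eq_pennScan (N : Nat) : ∀ cs : List Char, cs.length ≤ N → fourRep cs = pennScan cs := by
  induction N with
  | zero =>
    intro cs h
    have : cs = [] := by cases cs <;> simp_all
    subst this
    simp [fourRep, rep1, pennScan]
  | succ n ih =>
    intro cs h
    match cs with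
    | [] => simp [fourRep, rep1, pennScan]
    | [c] => simp [fourRep, rep1, pennScan]
    | c1 :: c2 :: t =>
      have ht : t.length ≤ n := by simp at h; omega
      have ht2 : (c2 :: t).length ≤ n := by simp at h ⊢; omega
      have iht := ih t ht
      simp only [fourRep] at iht
      have iht2 := ih (c2 :: t) ht2
      simp only [fourRep] at iht2
      by_cases h1 : c1 = '%'
      · subst h1
        by_cases hr : c2 = 'r' ∨ c2 = 'R'
        · rcases hr with hr | hr <;> subst hr
          · simp only [fourRep, rep1_hit 'r' ['|', '/'] 'r' t rfl, List.cons_append,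
              List.nil_append,
              rep1_cons_ne 'R' ['|', '/'] '|' _ (by decide), rep1_cons_ne 'R' ['|', '/'] '/' _ (by decide),
              rep1_cons_ne 't' ['|', '-'] '|' _ (by decide), rep1_cons_ne 't' ['|', '-'] '/' _ (by decide),
              rep1_cons_ne 'T' ['|', '-'] '|' _ (by decide), rep1_cons_ne 'T' ['|', '-'] '/' _ (by decide)]
            rw [iht]
            simp [pennScan]
          · have e1 : rep1 'r' ['|', '/'] ('%' :: 'R' :: t) = '%' :: 'R' :: rep1 'r' ['|', '/'] t := by
              rw [rep1_pct 'r' _ ('R' :: t) (by simp), rep1_cons_ne 'r' _ 'R' _ (by decide)]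
            simp only [fourRep, e1, rep1_hit 'R' ['|', '/'] 'R' _ rfl, List.cons_append,
              List.nil_append,
              rep1_cons_ne 't' ['|', '-'] '|' _ (by decide), rep1_cons_ne 't' ['|', '-'] '/' _ (by decide),
              rep1_cons_ne 'T' ['|', '-'] '|' _ (by decide), rep1_cons_ne 'T' ['|', '-'] '/' _ (by decide)]
            rw [iht]
            simp [pennScan]
        · by_cases hT : c2 = 't' ∨ c2 = 'T'
          · rcases hT with hT | hT <;> subst hT
            · have e1 : rep1 'r' ['|', '/'] ('%' :: 't' :: t) = '%' :: 't' :: rep1 'r' ['|', '/'] t := by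
                rw [rep1_pct 'r' _ ('t' :: t) (by simp), rep1_cons_ne 'r' _ 't' _ (by decide)]
              have e2 : rep1 'R' ['|', '/'] ('%' :: 't' :: rep1 'r' ['|', '/'] t) =
                  '%' :: 't' :: rep1 'R' ['|', '/'] (rep1 'r' ['|', '/'] t) := by
                rw [rep1_pct 'R' _ _ (by simp), rep1_cons_ne 'R' _ 't' _ (by decide)]
              simp only [fourRep, e1, e2, rep1_hit 't' ['|', '-'] 't' _ rfl, List.cons_append,
                List.nil_append,
                rep1_cons_ne 'T' ['|', '-'] '|' _ (by decide), rep1_cons_ne 'T' ['|', '-'] '-' _ (by decide)]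
              rw [iht]
              simp [pennScan]
            · have e1 : rep1 'r' ['|', '/'] ('%' :: 'T' :: t) = '%' :: 'T' :: rep1 'r' ['|', '/'] t := by
                rw [rep1_pct 'r' _ ('T' :: t) (by simp), rep1_cons_ne 'r' _ 'T' _ (by decide)]
              have e2 : rep1 'R' ['|', '/'] ('%' :: 'T' :: rep1 'r' ['|', '/'] t) =
                  '%' :: 'T' :: rep1 'R' ['|', '/'] (rep1 'r' ['|', '/'] t) := by
                rw [rep1_pct 'R' _ _ (by simp), rep1_cons_ne 'R' _ 'T' _ (by decide)]
              have e3 : rep1 't' ['|', '-'] ('%' :: 'T' :: rep1 'R' ['|', '/'] (rep1 'r' ['|', '/'] t)) =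
                  '%' :: 'T' :: rep1 't' ['|', '-'] (rep1 'R' ['|', '/'] (rep1 'r' ['|', '/'] t)) := by
                rw [rep1_pct 't' _ _ (by simp), rep1_cons_ne 't' _ 'T' _ (by decide)]
              simp only [fourRep, e1, e2, e3, rep1_hit 'T' ['|', '-'] 'T' _ rfl, List.cons_append,
                List.nil_append]
              rw [iht]
              simp [pennScan]
          · push Not at hr hT
            by_cases hp : c2 = '%'
            · subst hp
              have e1 : rep1 'r' ['|', '/'] ('%' :: '%' :: t) = '%' :: rep1 'r' ['|', '/'] ('%' :: t) := by
                rw [rep1_pct 'r' _ ('%' :: t) (by simp)]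
              have hh1 := head_rep1 'r' ['/'] ('%' :: t)
              have e2 : rep1 'R' ['|', '/'] ('%' :: rep1 'r' ['|', '/'] ('%' :: t)) =
                  '%' :: rep1 'R' ['|', '/'] (rep1 'r' ['|', '/'] ('%' :: t)) := by
                apply rep1_pct
                rcases hh1 with h' | h' <;> simp [h']
              have hh2 := head_fourRep_pct t
              have e3 : rep1 't' ['|', '-'] ('%' :: rep1 'R' ['|', '/'] (rep1 'r' ['|', '/'] ('%' :: t))) =
                  '%' :: rep1 't' ['|', '-'] (rep1 'R' ['|', '/'] (rep1 'r' ['|', '/'] ('%' :: t))) := by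
                apply rep1_pct
                rcases hh2 with h' | h' <;> simp [h']
              have hh3 := head_rep1 't' ['-'] (rep1 'R' ['|', '/'] (rep1 'r' ['|', '/'] ('%' :: t)))
              have e4 : rep1 'T' ['|', '-'] ('%' :: rep1 't' ['|', '-'] (rep1 'R' ['|', '/'] (rep1 'r' ['|', '/'] ('%' :: t)))) =
                  '%' :: rep1 'T' ['|', '-'] (rep1 't' ['|', '-'] (rep1 'R' ['|', '/'] (rep1 'r' ['|', '/'] ('%' :: t)))) := by
                apply rep1_pct
                rcases hh3 with h' | h' <;> rcases hh2 with h'' | h'' <;> simp_all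
              simp only [fourRep, e1, e2, e3, e4]
              rw [iht2]
              simp [pennScan]
            · have e1 : rep1 'r' ['|', '/'] ('%' :: c2 :: t) = '%' :: c2 :: rep1 'r' ['|', '/'] t := by
                rw [rep1_pct 'r' _ (c2 :: t) (by simp [hr.1]), rep1_cons_ne 'r' _ c2 _ hp]
              have e2 : rep1 'R' ['|', '/'] ('%' :: c2 :: rep1 'r' ['|', '/'] t) =
                  '%' :: c2 :: rep1 'R' ['|', '/'] (rep1 'r' ['|', '/'] t) := by
                rw [rep1_pct 'R' _ _ (by simp [hr.2]), rep1_cons_ne 'R' _ c2 _ hp]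
              have e3 : rep1 't' ['|', '-'] ('%' :: c2 :: rep1 'R' ['|', '/'] (rep1 'r' ['|', '/'] t)) =
                  '%' :: c2 :: rep1 't' ['|', '-'] (rep1 'R' ['|', '/'] (rep1 'r' ['|', '/'] t)) := by
                rw [rep1_pct 't' _ _ (by simp [hT.1]), rep1_cons_ne 't' _ c2 _ hp]
              have e4 : rep1 'T' ['|', '-'] ('%' :: c2 :: rep1 't' ['|', '-'] (rep1 'R' ['|', '/'] (rep1 'r' ['|', '/'] t))) =
                  '%' :: c2 :: rep1 'T' ['|', '-'] (rep1 't' ['|', '-'] (rep1 'R' ['|', '/'] (rep1 'r' ['|', '/'] t))) := by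
                rw [rep1_pct 'T' _ _ (by simp [hT.2]), rep1_cons_ne 'T' _ c2 _ hp]
              simp only [fourRep, e1, e2, e3, e4]
              rw [iht]
              have hps : pennScan ('%' :: c2 :: t) = '%' :: pennScan (c2 :: t) := by
                simp [pennScan, hr.1, hr.2, hT.1, hT.2]
              rw [hps, pennScan_cons_ne c2 t hp]
      · have e1 : rep1 'r' ['|', '/'] (c1 :: c2 :: t) = c1 :: rep1 'r' ['|', '/'] (c2 :: t) :=
          rep1_cons_ne _ _ _ _ h1
        have e2 := rep1_cons_ne 'R' ['|', '/'] c1 (rep1 'r' ['|', '/'] (c2 :: t)) h1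
        have e3 := rep1_cons_ne 't' ['|', '-'] c1 (rep1 'R' ['|', '/'] (rep1 'r' ['|', '/'] (c2 :: t))) h1
        have e4 := rep1_cons_ne 'T' ['|', '-'] c1 (rep1 't' ['|', '-'] (rep1 'R' ['|', '/'] (rep1 'r' ['|', '/'] (c2 :: t)))) h1
        simp only [fourRep, e1, e2, e3, e4]
        rw [iht2]
        simp [pennScan, h1]

theorem chain_toList (s : String) :
    (PySem.Str.replace (PySem.Str.replace (PySem.Str.replace (PySem.Str.replace s "%r" "|/") "%R" "|/") "%t" "|-") "%T" "|-").toList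
      = fourRep s.toList := by
  have h1 : ("%r" : String).toList = ['%', 'r'] := by decide
  have h2 : ("%R" : String).toList = ['%', 'R'] := by decide
  have h3 : ("%t" : String).toList = ['%', 't'] := by decide
  have h4 : ("%T" : String).toList = ['%', 'T'] := by decide
  have h5 : ("|/" : String).toList = ['|', '/'] := by decide
  have h6 : ("|-" : String).toList = ['|', '-'] := by decide
  simp only [PySem.Str.toList_replace, h1, h2, h3, h4, h5, h6, replace_eq_rep1]
  rfl

-- ===== VERDICT (by name: the statement is the Claim_ definition above) =====
theorem penn_substitutions_spec : Claim_equal_penn_substitutions := by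
  intro input _
  unfold Spec_penn_substitutions penn_substitutions penn_substitutions_alt
  match input with
  | none => rfl
  | some s =>
    by_cases hs : s = ""
    · simp [hs]
    · simp only [hs, if_false, List.foldl]
      have key : fourRep s.toList = pennScan s.toList :=
        fourRep_eq_pennScan s.toList.length s.toList (le_refl _)
      have hA := chain_toList s
      rw [key] at hA
      rw [← hA]
      exact String.ofList_toList.symm
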